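-- pv_equiv track=rewrite | github.com/canizzadev/sistema-capas | execution/extract_phone.py | _pick_best_number
-- ===== SOURCE A (Python) =====
-- def _is_mobile(number: str) -> bool:
--     """Check if the number is a mobile (9 digits after DDD, starts with 9)."""
--     if len(number) == 13:
--         return number[4] == '9'
--     return False
--
-- def _pick_best_number(candidates: list) -> str:
--     """
--     From a list of (source, number) tuples, pick the best one.
--     Prefers mobile numbers (9 digits after DDD) over landlines.
--     """
--     if not candidates:
--         return None
--
--     # Deduplicate preserving order
--     seen = set()
--     unique = []
--     for source, num in candidates:
--         if num not in seen:
--             seen.add(num)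
--             unique.append((source, num))
--
--     # Prefer mobile numbers
--     for source, num in unique:
--         if _is_mobile(num):
--             return num
--
--     # Fallback to first valid
--     return unique[0][1]
-- ===== SOURCE B (Python) =====
-- def _is_mobile(number: str) -> bool:
--     """Check if the number is a mobile (9 digits after DDD, starts with 9)."""
--     if len(number) == 13:
--         return number[4] == '9'
--     return False
--
-- def _pick_best_number(candidates: list) -> str:
--     """
--     From a list of (source, number) tuples, pick the best one.
--     One max() reduction with priority key (mobile?, -position):
--     mobiles outrank landlines, earlier entries outrank later ones.
--     """
--     if not candidates:
--         return None
--     return max(enumerate(candidates),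
--                key=lambda t: (_is_mobile(t[1][1]), -t[0]))[1][1]
-- ===== Notes on version B (the rewrite author's own statement) =====
-- stated objective: alternative
-- what changed: B replaces A's two staged loops (order-preserving dedup into a 'unique' list, then a scan for the first mobile with unique[0] fallback) by a single max() reduction over enumerate(candidates) with priority key (is_mobile, -index); dedup is provably irrelevant to the returned value.
import Mathlib
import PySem

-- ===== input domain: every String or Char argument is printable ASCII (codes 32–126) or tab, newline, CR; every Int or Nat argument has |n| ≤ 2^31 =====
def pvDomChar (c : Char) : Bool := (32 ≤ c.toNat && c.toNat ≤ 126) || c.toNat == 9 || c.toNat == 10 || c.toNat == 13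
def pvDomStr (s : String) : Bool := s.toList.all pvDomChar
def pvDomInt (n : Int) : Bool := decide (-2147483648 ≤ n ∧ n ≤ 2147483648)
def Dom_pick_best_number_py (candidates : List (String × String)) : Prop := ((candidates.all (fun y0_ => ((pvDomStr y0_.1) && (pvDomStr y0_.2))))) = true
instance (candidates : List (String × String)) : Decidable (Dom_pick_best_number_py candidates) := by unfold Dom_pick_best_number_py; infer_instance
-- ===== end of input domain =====

-- B replaces A's two staged loops (dedup pass + first-mobile scan with unique[0] fallback)
-- by a single max() reduction over enumerate(candidates) with priority key (is_mobile, -index).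


-- ===== PORT A =====
-- _is_mobile (shared helper, identical in Source A and Source B)
def pv_is_mobile (number : String) : Bool :=
  if PySem.Str.len number == 13 then PySem.Str.pyGet? number 4 == some '9' else false

-- A's dedup loop: 'for source, num in candidates: if num not in seen: seen.add(num); unique.append(...)'
def pvDedupLoop (seen : PySem.Set String) (unique : List (String × String)) :
    List (String × String) → List (String × String)
  | [] => unique
  | (source, num) :: rest =>
    if PySem.Set.contains seen num then pvDedupLoop seen unique rest
    else pvDedupLoop (PySem.Set.add seen num) (unique ++ [(source, num)]) rest

-- A's second loop: 'for source, num in unique: if _is_mobile(num): return num'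
def pvFindMobileA : List (String × String) → Option String
  | [] => none
  | (_, num) :: rest => if pv_is_mobile num then some num else pvFindMobileA rest

def pick_best_number_py (candidates : List (String × String)) : Option String :=
  if candidates = [] then none
  else
    let unique := pvDedupLoop PySem.Set.empty [] candidates
    match pvFindMobileA unique with
    | some num => some num
    | none => (PySem.List.pyGet? unique 0).map (fun p => p.2)   -- unique[0][1]

-- ===== PORT B =====
-- 'max(enumerate(candidates), key=lambda t: (_is_mobile(t[1][1]), -t[0]))[1][1]'
-- (Python bools compare as ints under max: True=1, False=0)
def pick_best_number_py_alt (candidates : List (String × String)) : Option String :=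
  if candidates = [] then none
  else
    match PySem.List.max2? (PySem.List.enumerate candidates)
        (fun t => (if pv_is_mobile t.2.2 then (1 : Int) else 0))
        (fun t => -t.1) with
    | some t => some t.2.2
    | none => none

-- ===== PRECONDITION & SPEC =====
def Spec_pick_best_number_py (candidates : List (String × String)) (out : Option String) : Prop := out = pick_best_number_py_alt candidates
instance (candidates : List (String × String)) (out : Option String) : Decidable (Spec_pick_best_number_py candidates out) := by unfold Spec_pick_best_number_py; infer_instance

-- ===== CLAIM (what is proved, stated in full; the proofs are below) =====
def Claim_equal_pick_best_number_py : Prop := ∀ (candidates : List (String × String)), Dom_pick_best_number_py candidates → Spec_pick_best_number_py candidates (pick_best_number_py candidates)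

-- ===== LEMMAS AND PROOFS =====

-- proof-only helper: the first mobile number of a list (reference value both sides meet)
def pvFirstMobile : List (String × String) → Option String
  | [] => none
  | (_, num) :: rest => if pv_is_mobile num then some num else pvFirstMobile rest

theorem pv_mem_add {s : PySem.Set String} {x y : String}
    (h : y ∈ PySem.Set.add s x) : y ∈ s ∨ y = x := by
  unfold PySem.Set.add at h
  split at h
  · exact Or.inl h
  · rcases List.mem_append.mp h with h1 | h1
    · exact Or.inl h1
    · exact Or.inr (List.mem_singleton.mp h1)

-- the 'unique' accumulator only grows by appends
theorem pvDedupLoop_acc (rest : List (String × String)) :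
    ∀ (seen : PySem.Set String) (unique : List (String × String)),
      pvDedupLoop seen unique rest = unique ++ pvDedupLoop seen [] rest := by
  induction rest with
  | nil => intro seen unique; simp [pvDedupLoop]
  | cons p rest ih =>
    intro seen unique
    obtain ⟨s, n⟩ := p
    by_cases h : n ∈ seen
    · rw [show pvDedupLoop seen unique ((s, n) :: rest)
            = pvDedupLoop seen unique rest by simp [pvDedupLoop, h],
          show pvDedupLoop seen [] ((s, n) :: rest)
            = pvDedupLoop seen [] rest by simp [pvDedupLoop, h],
          ih]
    · rw [show pvDedupLoop seen unique ((s, n) :: rest)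
            = pvDedupLoop (PySem.Set.add seen n) (unique ++ [(s, n)]) rest by
              simp [pvDedupLoop, h],
          show pvDedupLoop seen [] ((s, n) :: rest)
            = pvDedupLoop (PySem.Set.add seen n) [(s, n)] rest by
              simp [pvDedupLoop, h],
          ih _ (unique ++ [(s, n)]), ih _ [(s, n)]]
      simp

-- if every number already seen is non-mobile, dedup does not change the first mobile found
theorem pvFindMobile_dedup (rest : List (String × String)) :
    ∀ (seen : PySem.Set String), (∀ n ∈ seen, pv_is_mobile n = false) →
      pvFindMobileA (pvDedupLoop seen [] rest) = pvFirstMobile rest := by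
  induction rest with
  | nil => intro seen _; simp [pvDedupLoop, pvFindMobileA, pvFirstMobile]
  | cons p rest ih =>
    intro seen hseen
    obtain ⟨s, n⟩ := p
    by_cases h : n ∈ seen
    · have hn : pv_is_mobile n = false := hseen n h
      rw [show pvDedupLoop seen [] ((s, n) :: rest)
            = pvDedupLoop seen [] rest by simp [pvDedupLoop, h]]
      simp [pvFirstMobile, hn, ih seen hseen]
    · have hstep : pvDedupLoop seen [] ((s, n) :: rest)
          = (s, n) :: pvDedupLoop (PySem.Set.add seen n) [] rest := by
        rw [show pvDedupLoop seen [] ((s, n) :: rest)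
              = pvDedupLoop (PySem.Set.add seen n) [(s, n)] rest by
                simp [pvDedupLoop, h],
            pvDedupLoop_acc]
        rfl
      by_cases hm : pv_is_mobile n
      · simp [hstep, pvFindMobileA, pvFirstMobile, hm]
      · have hseen' : ∀ m ∈ PySem.Set.add seen n, pv_is_mobile m = false := by
          intro m hmem
          rcases pv_mem_add hmem with h1 | h1
          · exact hseen m h1
          · subst h1; simpa using hm
        simp [hstep, pvFindMobileA, pvFirstMobile, hm,
          ih (PySem.Set.add seen n) hseen']

-- B's max2? step function, named for the lemmas
def pvStep (acc : Option (Int × (String × String))) (x : Int × (String × String)) :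
    Option (Int × (String × String)) :=
  match acc with
  | none => some x
  | some m =>
    if (decide ((if pv_is_mobile m.2.2 then (1 : Int) else 0) < (if pv_is_mobile x.2.2 then (1 : Int) else 0))
        || (!decide ((if pv_is_mobile x.2.2 then (1 : Int) else 0) < (if pv_is_mobile m.2.2 then (1 : Int) else 0))
            && decide (-m.1 < -x.1))) = true then some x else some m

theorem pv_max2_eq_foldl (xs : List (Int × (String × String))) :
    PySem.List.max2? xs
      (fun t => (if pv_is_mobile t.2.2 then (1 : Int) else 0))
      (fun t => -t.1)
    = xs.foldl pvStep none := by
  unfold PySem.List.max2?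
  congr 1
  funext acc x
  cases acc with
  | none => rfl
  | some m => simp [pvStep]

theorem pv_enumerate_cons (x : String × String) (t : List (String × String)) (j : Int) :
    PySem.List.enumerate (x :: t) j = (j, x) :: PySem.List.enumerate t (j + 1) := by
  rfl

-- characterisation of B's reduction: with indices strictly increasing, the (-index) tiebreak
-- never fires, so the fold keeps its accumulator unless it meets a mobile while holding a landline
theorem pvFold_char (l : List (String × String)) :
    ∀ (j i : Int) (p : String × String), i < j →
      (List.foldl pvStep (some (i, p)) (PySem.List.enumerate l j)).map (fun t => t.2.2)
        = some (if pv_is_mobile p.2 then p.2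
                else match pvFirstMobile l with
                     | some n => n
                     | none => p.2) := by
  induction l with
  | nil => intro j i p _; simp [PySem.List.enumerate, pvFirstMobile]
  | cons q t ih =>
    intro j i p hij
    obtain ⟨s, n⟩ := q
    rw [pv_enumerate_cons]
    by_cases hp : pv_is_mobile p.2
    · have hstep : pvStep (some (i, p)) (j, (s, n)) = some (i, p) := by
        simp only [pvStep, hp]
        by_cases hn : pv_is_mobile n
        · simp [hn]; omega
        · simp [hn]
      rw [List.foldl_cons, hstep, ih (j + 1) i p (by omega)]
      simp [hp]
    · by_cases hn : pv_is_mobile n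
      · have hstep : pvStep (some (i, p)) (j, (s, n)) = some (j, (s, n)) := by
          simp [pvStep, hp, hn]
        rw [List.foldl_cons, hstep, ih (j + 1) j (s, n) (by omega)]
        simp [pvFirstMobile, hn, hp]
      · have hstep : pvStep (some (i, p)) (j, (s, n)) = some (i, p) := by
          simp [pvStep, hp, hn]; omega
        rw [List.foldl_cons, hstep, ih (j + 1) i p (by omega)]
        simp [pvFirstMobile, hp, hn]

-- ===== VERDICT (by name: the statement is the Claim_ definition above) =====
theorem pick_best_number_py_spec : Claim_equal_pick_best_number_py := by
  intro candidates _
  unfold Spec_pick_best_number_py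
  match candidates with
  | [] => rfl
  | (s0, n0) :: rest =>
    -- A's side equals: first mobile of the list, else n0
    have hded : pvDedupLoop PySem.Set.empty [] ((s0, n0) :: rest)
        = (s0, n0) :: pvDedupLoop (PySem.Set.add PySem.Set.empty n0) [] rest := by
      rw [show pvDedupLoop PySem.Set.empty [] ((s0, n0) :: rest)
            = pvDedupLoop (PySem.Set.add PySem.Set.empty n0) [(s0, n0)] rest by
              simp [pvDedupLoop],
          pvDedupLoop_acc]
      rfl
    have hseen : ∀ m ∈ (PySem.Set.empty : PySem.Set String), pv_is_mobile m = false := by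
      intro m hm; simp [PySem.Set.empty] at hm
    have hfm : pvFindMobileA (pvDedupLoop PySem.Set.empty [] ((s0, n0) :: rest))
        = pvFirstMobile ((s0, n0) :: rest) :=
      pvFindMobile_dedup _ _ hseen
    have hA : pick_best_number_py ((s0, n0) :: rest)
        = match pvFirstMobile ((s0, n0) :: rest) with
          | some num => some num
          | none => some n0 := by
      unfold pick_best_number_py
      simp only [reduceCtorEq, if_false]
      rw [hfm]
      cases hmb : pvFirstMobile ((s0, n0) :: rest) with
      | some num => rfl
      | none => rw [hded]; simp
    -- B's side equals the same value
    have hB : pick_best_number_py_alt ((s0, n0) :: rest)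
        = match pvFirstMobile ((s0, n0) :: rest) with
          | some num => some num
          | none => some n0 := by
      unfold pick_best_number_py_alt
      simp only [reduceCtorEq, if_false]
      rw [pv_max2_eq_foldl, pv_enumerate_cons,
          List.foldl_cons, show pvStep none (0, (s0, n0)) = some (0, (s0, n0)) from rfl]
      have h := pvFold_char rest (0 + 1) 0 (s0, n0) (by omega)
      cases hres : List.foldl pvStep (some (0, (s0, n0))) (PySem.List.enumerate rest (0 + 1)) with
      | none => rw [hres] at h; simp at h
      | some t =>
        rw [hres] at h
        simp only [Option.map_some, Option.some.injEq] at h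
        by_cases h0 : pv_is_mobile n0
        · simp only [pvFirstMobile, h0, if_true]
          simp [h0] at h
          simp [h]
        · simp only [pvFirstMobile, h0]
          simp [h0] at h
          cases hfm2 : pvFirstMobile rest with
          | some m => rw [hfm2] at h; simp [h]
          | none => rw [hfm2] at h; simp [h]
    rw [hA, hB]
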